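-- pv_equiv track=rewrite | github.com/plilja/adventofcode | y2021/day19/day19.py | find_correct_rotation
-- ===== SOURCE A (Python) =====
-- def find_correct_rotation(scanner1, scanner2):
--     beacons1 = set(scanner1)
--     for rot in rotations(scanner2):
--         for x1, y1, z1 in scanner1[11:]:
--             for x2, y2, z2 in rot:
--                 dx = x1 - x2
--                 dy = y1 - y2
--                 dz = z1 - z2
--                 rem = len(rot)
--                 matches = 0
--                 for x3, y3, z3 in rot:
--                     beacon = (x3 + dx, y3 + dy, z3 + dz)
--                     if beacon in beacons1:
--                         matches += 1
--                     rem -= 1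
--                     if rem + matches < 12:
--                         break
--                 if matches >= 12:
--                     ls = []
--                     for x3, y3, z3 in rot:
--                         ls.append((x3 + dx, y3 + dy, z3 + dz))
--                     return ls, (dx, dy, dz)
--     return None, None
--
-- def rotations(scanner):
--     perms = [((0, 1), (1, 1), (2, 1)),
--              ((1, 1), (2, 1), (0, 1)),
--              ((0, -1), (2, 1), (1, 1)),
--              ((2, 1), (0, -1), (1, -1)),
--              ((2, 1), (1, 1), (0, -1)),
--              ((0, 1), (1, -1), (2, -1))]
--     result = []
--     for (a, da), (b, db), (c, dc) in perms:
--         result.append([])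
--         for beacon in scanner:
--             ls = [0, 0, 0]
--             ls[0] = beacon[a] * da
--             ls[1] = beacon[b] * db
--             ls[2] = beacon[c] * dc
--             result[-1].append(tuple(ls))
--         for j in range(0, 3):
--             result.append([])
--             for x, y, z in result[-2]:
--                 result[-1].append((y, -x, z))
--     assert len(result) == 24
--     return result
-- ===== SOURCE B (Python) =====
-- # B: same alignment search, but per rotation precompute a dict counting every
-- # offset (beacon1 - rotated_beacon2); number of matches for offset d is then a
-- # single O(1) lookup instead of an O(n) membership scan, O(24*n^2) vs O(24*n^3).
--
-- PERMS = [((0, 1), (1, 1), (2, 1)),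
--          ((1, 1), (2, 1), (0, 1)),
--          ((0, -1), (2, 1), (1, 1)),
--          ((2, 1), (0, -1), (1, -1)),
--          ((2, 1), (1, 1), (0, -1)),
--          ((0, 1), (1, -1), (2, -1))]
--
--
-- def spin(p):
--     x, y, z = p
--     return (y, -x, z)
--
--
-- def rotations(scanner):
--     rots = []
--     for (a, da), (b, db), (c, dc) in PERMS:
--         base = [(p[a] * da, p[b] * db, p[c] * dc) for p in scanner]
--         for _ in range(4):
--             rots.append(base)
--             base = [spin(p) for p in base]
--     return rots
--
--
-- def find_correct_rotation(scanner1, scanner2):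
--     beacons1 = set(scanner1)
--     tail = scanner1[11:]
--     for rot in rotations(scanner2):
--         offs = [(px - qx, py - qy, pz - qz)
--                 for qx, qy, qz in rot
--                 for px, py, pz in beacons1]
--         counts = {}
--         for d in offs:
--             counts[d] = counts.get(d, 0) + 1
--         for x1, y1, z1 in tail:
--             for x2, y2, z2 in rot:
--                 d = (x1 - x2, y1 - y2, z1 - z2)
--                 if counts.get(d, 0) >= 12:
--                     return [(x3 + d[0], y3 + d[1], z3 + d[2])
--                             for x3, y3, z3 in rot], d
--     return None, None
-- ===== Notes on version B (the rewrite author's own statement) =====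
-- stated objective: faster
-- what changed: Per rotation, B precomputes a dict counting every pairwise offset (beacon1 - rotated beacon2), so the match count for a candidate offset is one O(1) dict lookup instead of A's inner O(n) membership-counting scan over the rotated scanner.
import Mathlib
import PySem

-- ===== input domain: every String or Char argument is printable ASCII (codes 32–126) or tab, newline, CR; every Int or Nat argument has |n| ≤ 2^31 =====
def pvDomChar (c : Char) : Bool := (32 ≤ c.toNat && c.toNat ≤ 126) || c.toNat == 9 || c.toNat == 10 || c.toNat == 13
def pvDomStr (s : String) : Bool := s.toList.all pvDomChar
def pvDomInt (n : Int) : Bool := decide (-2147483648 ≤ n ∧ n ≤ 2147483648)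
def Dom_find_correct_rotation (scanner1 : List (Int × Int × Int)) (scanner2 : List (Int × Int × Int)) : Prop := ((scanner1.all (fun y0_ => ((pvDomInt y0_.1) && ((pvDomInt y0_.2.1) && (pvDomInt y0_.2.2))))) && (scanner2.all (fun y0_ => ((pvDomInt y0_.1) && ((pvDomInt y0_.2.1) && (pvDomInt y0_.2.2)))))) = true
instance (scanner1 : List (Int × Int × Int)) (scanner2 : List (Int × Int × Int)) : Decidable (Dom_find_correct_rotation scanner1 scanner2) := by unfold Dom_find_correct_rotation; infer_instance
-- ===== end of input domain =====

-- B precomputes, per rotation, a dict counting every pairwise offset, replacing A's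
-- inner membership-counting scan by one dict lookup (measured faster, O(24*n^2) vs O(24*n^3)).

-- ===== PORT A =====
-- shared geometry helpers (tuple arithmetic used verbatim by both Pythons)
def pvIdx3 (p : Int × Int × Int) (i : Nat) : Int :=
  match i with
  | 0 => p.1
  | 1 => p.2.1
  | _ => p.2.2

def pvPerms : List ((Nat × Int) × (Nat × Int) × (Nat × Int)) :=
  [((0, 1), (1, 1), (2, 1)),
   ((1, 1), (2, 1), (0, 1)),
   ((0, -1), (2, 1), (1, 1)),
   ((2, 1), (0, -1), (1, -1)),
   ((2, 1), (1, 1), (0, -1)),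
   ((0, 1), (1, -1), (2, -1))]

def pvPermApply (perm : (Nat × Int) × (Nat × Int) × (Nat × Int)) (b : Int × Int × Int) : Int × Int × Int :=
  (pvIdx3 b perm.1.1 * perm.1.2, pvIdx3 b perm.2.1.1 * perm.2.1.2, pvIdx3 b perm.2.2.1 * perm.2.2.2)

def pvSpin (p : Int × Int × Int) : Int × Int × Int := (p.2.1, -p.1, p.2.2)

def pvSub (p q : Int × Int × Int) : Int × Int × Int := (p.1 - q.1, p.2.1 - q.2.1, p.2.2 - q.2.2)

def pvAdd (q d : Int × Int × Int) : Int × Int × Int := (q.1 + d.1, q.2.1 + d.2.1, q.2.2 + d.2.2)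

-- A's rotations: append the permuted copy, then three times append result[-1] spun
def rotationsA (scanner : List (Int × Int × Int)) : List (List (Int × Int × Int)) :=
  pvPerms.foldl (fun result perm =>
    let base := scanner.map (pvPermApply perm)
    (List.range 3).foldl
      (fun res _ => res ++ [(PySem.List.pyGetD res (-1) []).map pvSpin])
      (result ++ [base]))
    []

-- A's inner loop over rot: mcount / rem with the early break 'rem + mcount < 12'
def pvCountBreak (beacons1 : PySem.Set (Int × Int × Int)) (d : Int × Int × Int) :
    List (Int × Int × Int) → Int → Int → Int
  | [], _, mcount => mcount
  | q :: rest, rem, mcount =>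
    let mcount := if PySem.Set.contains beacons1 (pvAdd q d) then mcount + 1 else mcount
    let rem := rem - 1
    if rem + mcount < 12 then mcount else pvCountBreak beacons1 d rest rem mcount

def find_correct_rotation (scanner1 : List (Int × Int × Int)) (scanner2 : List (Int × Int × Int)) : (Option (List (Int × Int × Int))) × (Option (Int × Int × Int)) :=
  let beacons1 := PySem.Set.ofList scanner1
  match (rotationsA scanner2).findSome? (fun rot =>
    (PySem.List.slice scanner1 (some 11) none).findSome? (fun p1 =>
      rot.findSome? (fun p2 =>
        let d := pvSub p1 p2
        let mcount := pvCountBreak beacons1 d rot (PySem.List.len rot) 0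
        if 12 ≤ mcount then some (rot.map (fun q => pvAdd q d), d) else none))) with
  | some (ls, d) => (some ls, some d)
  | none => (none, none)

-- ===== PORT B =====
-- B's rotations: closed form — for each perm emit base and its three successive spins
def rotationsB (scanner : List (Int × Int × Int)) : List (List (Int × Int × Int)) :=
  pvPerms.foldl (fun rots perm =>
    let base := scanner.map (pvPermApply perm)
    ((List.range 4).foldl
      (fun (st : List (List (Int × Int × Int)) × List (Int × Int × Int)) _ =>
        (st.1 ++ [st.2], st.2.map pvSpin))
      (rots, base)).1)
    []

def find_correct_rotation_alt (scanner1 : List (Int × Int × Int)) (scanner2 : List (Int × Int × Int)) : (Option (List (Int × Int × Int))) × (Option (Int × Int × Int)) :=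
  let beacons1 := PySem.Set.ofList scanner1
  let tail := PySem.List.slice scanner1 (some 11) none
  match (rotationsB scanner2).findSome? (fun rot =>
    let offs := rot.flatMap (fun q => beacons1.map (fun p => pvSub p q))
    let counts := offs.foldl (fun dct x => dct.insert x (dct.getD x (0 : Int) + 1)) PySem.Dict.empty
    tail.findSome? (fun p1 =>
      rot.findSome? (fun p2 =>
        let d := pvSub p1 p2
        if 12 ≤ counts.getD d 0 then some (rot.map (fun q => pvAdd q d), d) else none))) with
  | some (ls, d) => (some ls, some d)
  | none => (none, none)

-- ===== PRECONDITION & SPEC =====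
def Spec_find_correct_rotation (scanner1 : List (Int × Int × Int)) (scanner2 : List (Int × Int × Int)) (out : (Option (List (Int × Int × Int))) × (Option (Int × Int × Int))) : Prop := out = find_correct_rotation_alt scanner1 scanner2
instance (scanner1 : List (Int × Int × Int)) (scanner2 : List (Int × Int × Int)) (out : (Option (List (Int × Int × Int))) × (Option (Int × Int × Int))) : Decidable (Spec_find_correct_rotation scanner1 scanner2 out) := by unfold Spec_find_correct_rotation; infer_instance

-- ===== CLAIM (what is proved, stated in full; the proofs are below) =====
def Claim_equal_find_correct_rotation : Prop := ∀ (scanner1 : List (Int × Int × Int)) (scanner2 : List (Int × Int × Int)), Dom_find_correct_rotation scanner1 scanner2 → Spec_find_correct_rotation scanner1 scanner2 (find_correct_rotation scanner1 scanner2)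

-- ===== LEMMAS AND PROOFS =====

theorem rotations_eq (scanner : List (Int × Int × Int)) : rotationsA scanner = rotationsB scanner := by
  unfold rotationsA rotationsB
  congr 1
  funext result perm
  have h3 : List.range 3 = [0,1,2] := rfl
  have h4 : List.range 4 = [0,1,2,3] := rfl
  rw [h3, h4]
  simp only [List.foldl]
  rw [PySem.List.pyGetD_neg_one_append_singleton]
  rw [PySem.List.pyGetD_neg_one_append_singleton]
  rw [PySem.List.pyGetD_neg_one_append_singleton]
theorem countBreak_iff (S : PySem.Set (Int × Int × Int)) (d : Int × Int × Int)
    (l : List (Int × Int × Int)) (m : Int) :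
    (12 ≤ pvCountBreak S d l (l.length : Int) m) ↔
      (12 ≤ m + (l.countP (fun q => PySem.Set.contains S (pvAdd q d)) : Int)) := by
  induction l generalizing m with
  | nil => simp [pvCountBreak]
  | cons q rest ih =>
    have hle : rest.countP (fun q => PySem.Set.contains S (pvAdd q d)) ≤ rest.length :=
      List.countP_le_length
    simp only [pvCountBreak, List.length_cons, List.countP_cons]
    have e : ((rest.length + 1 : Nat) : Int) - 1 = (rest.length : Int) := by push_cast; ring
    rw [e]
    split_ifs with hmem hbrk hbrk
    · omega
    · rw [ih]; omega
    · omega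
    · rw [ih]; omega
theorem count_map_sub (S : List (Int × Int × Int)) (hS : S.Nodup) (q d : Int × Int × Int) :
    (S.map (fun p => pvSub p q)).count d = if PySem.Set.contains S (pvAdd q d) then 1 else 0 := by
  have hcongr : ∀ p : Int × Int × Int, (pvSub p q = d) ↔ (p = pvAdd q d) := by
    rintro ⟨a, b, c⟩
    obtain ⟨qa, qb, qc⟩ := q; obtain ⟨da, db, dc⟩ := d
    simp only [pvSub, pvAdd, Prod.mk.injEq]
    omega
  have h1 : (S.map (fun p => pvSub p q)).count d = S.count (pvAdd q d) := by
    simp only [List.count, List.countP_map]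
    apply List.countP_congr
    intro p _
    simp only [Function.comp, beq_iff_eq, hcongr]
  rw [h1]
  by_cases hmem : pvAdd q d ∈ S
  · rw [if_pos, List.count_eq_one_of_mem hS hmem]
    simp [PySem.Set.contains, hmem]
  · rw [if_neg, List.count_eq_zero_of_not_mem hmem]
    simp [PySem.Set.contains, hmem]

theorem counts_getD (S : PySem.Set (Int × Int × Int)) (hS : S.Nodup)
    (rot : List (Int × Int × Int)) (d : Int × Int × Int) :
    ((rot.flatMap (fun q => S.map (fun p => pvSub p q))).foldl
        (fun dct x => dct.insert x (dct.getD x (0 : Int) + 1)) PySem.Dict.empty).getD d 0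
      = (rot.countP (fun q => PySem.Set.contains S (pvAdd q d)) : Int) := by
  rw [PySem.Dict.foldl_insert_getD_add_one_eq_counter, PySem.Dict.getD_counter]
  congr 1
  induction rot with
  | nil => simp
  | cons q rest ih =>
    simp only [List.flatMap_cons, List.count_append, List.countP_cons, ih,
      count_map_sub S hS q d]
    split_ifs with h <;> omega
theorem findSome?_congr_mem {α β : Type} {l : List α} {f g : α → Option β}
    (h : ∀ a ∈ l, f a = g a) : l.findSome? f = l.findSome? g := by
  induction l with
  | nil => rfl
  | cons a t ih =>
    rw [List.findSome?_cons, List.findSome?_cons, h a (by simp)]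
    cases g a with
    | some b => rfl
    | none => exact ih (fun x hx => h x (by simp [hx]))

theorem inner_eq (S : PySem.Set (Int × Int × Int)) (hS : S.Nodup)
    (tail rot : List (Int × Int × Int)) :
    tail.findSome? (fun p1 => rot.findSome? (fun p2 =>
        if 12 ≤ pvCountBreak S (pvSub p1 p2) rot (PySem.List.len rot) 0
        then some (rot.map (fun q => pvAdd q (pvSub p1 p2)), pvSub p1 p2) else none))
      = tail.findSome? (fun p1 => rot.findSome? (fun p2 =>
        if 12 ≤ ((rot.flatMap (fun q => S.map (fun p => pvSub p q))).foldl
            (fun dct x => dct.insert x (dct.getD x (0 : Int) + 1)) PySem.Dict.empty).getD (pvSub p1 p2) 0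
        then some (rot.map (fun q => pvAdd q (pvSub p1 p2)), pvSub p1 p2) else none)) := by
  apply findSome?_congr_mem; intro p1 _
  apply findSome?_congr_mem; intro p2 _
  apply if_congr _ rfl rfl
  rw [counts_getD S hS rot (pvSub p1 p2), PySem.List.len_eq, countBreak_iff]
  omega

theorem main_eq (s1 s2 : List (Int × Int × Int)) :
    find_correct_rotation s1 s2 = find_correct_rotation_alt s1 s2 := by
  unfold find_correct_rotation find_correct_rotation_alt
  dsimp only
  rw [rotations_eq]
  rw [findSome?_congr_mem (fun rot _ =>
    inner_eq (PySem.Set.ofList s1) (PySem.Set.nodup_ofList s1) (PySem.List.slice s1 (some 11) none) rot)]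

-- ===== VERDICT (by name: the statement is the Claim_ definition above) =====
theorem find_correct_rotation_spec : Claim_equal_find_correct_rotation := by
  intro s1 s2 _
  unfold Spec_find_correct_rotation
  exact main_eq s1 s2
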